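-- pv_equiv track=rewrite | github.com/mwaliahmad/DSA-Lab | Lab1/Lab1.py | Sort10
-- ===== SOURCE A (Python) =====
-- def Minimun(Arr, Starting, Ending):
--
--     result = min(Arr[Starting:Ending+1])
--
--     return result
--
-- def Sort4(Arr):
--     Sorted = []
--     while (len(Arr)!=0):
--         result = Minimun(Arr, 0, len(Arr))
--         Arr.remove(result)
--         Sorted.append(result)
--
--     return Sorted
--
-- def Sort10(Arr):
--     Arr = Sort4(Arr)
--     pos = [i for i in Arr if i>=0]
--     neg = [i for i in Arr if i<0]
--     ArrFinal = []
--     while (pos and neg):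
--         ArrFinal.append(neg.pop(0))
--         ArrFinal.append(pos.pop(0))
--     ArrFinal.extend(pos)
--     ArrFinal.extend(neg)
--
--     return ArrFinal
-- ===== SOURCE B (Python) =====
-- def Sort10(Arr):
--     # Partition-then-sort: drain Arr into sign buckets (consuming it, like A
--     # empties its argument), sort each bucket, then interleave neg/pos.
--     pos, neg = [], []
--     while Arr:
--         x = Arr.pop()
--         (pos if x >= 0 else neg).append(x)
--     pos.sort()
--     neg.sort()
--     out = []
--     for n, p in zip(neg, pos):
--         out.append(n)
--         out.append(p)
--     k = min(len(pos), len(neg))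
--     return out + pos[k:] + neg[k:]
-- ===== Notes on version B (the rewrite author's own statement) =====
-- stated objective: faster
-- what changed: Replaces A's O(n^2) selection sort (repeated min + remove on the whole list) followed by partition and a pop(0) interleave with a partition-then-sort decomposition: drain the input into sign buckets, sort each with the builtin O(n log n) sort, and zip-interleave without pop(0).
import Mathlib
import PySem

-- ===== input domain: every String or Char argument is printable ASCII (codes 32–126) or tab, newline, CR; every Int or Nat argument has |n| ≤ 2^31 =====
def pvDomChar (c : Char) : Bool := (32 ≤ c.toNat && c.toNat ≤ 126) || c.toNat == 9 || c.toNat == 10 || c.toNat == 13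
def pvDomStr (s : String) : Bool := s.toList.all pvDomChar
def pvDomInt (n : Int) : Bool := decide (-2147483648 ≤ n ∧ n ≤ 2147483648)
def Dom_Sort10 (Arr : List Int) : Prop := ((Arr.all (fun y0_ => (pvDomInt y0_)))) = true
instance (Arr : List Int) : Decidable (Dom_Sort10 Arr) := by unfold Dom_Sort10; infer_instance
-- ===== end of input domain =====

-- B replaces A's quadratic selection sort + pop(0) interleave by partition-then-sort with the
-- builtin sort and a zip interleave; equal return value. In Python both A and B empty the
-- caller's list; the theorems here are about the RETURN value only.


-- ===== PORT A =====
-- min(Arr[Starting:Ending+1])  (none = Python's ValueError on an empty slice)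
def Minimun (Arr : List Int) (Starting Ending : Int) : Option Int :=
  PySem.List.min? (PySem.List.slice Arr (some Starting) (some (Ending + 1))) (fun x => x)

-- the while-loop of Sort4; the 'none' branches are unreachable (Arr is nonempty there)
def Sort4Loop (Arr Sorted : List Int) : List Int :=
  if Arr.length ≠ 0 then
    match Minimun Arr 0 (Arr.length : Int) with
    | none => Sorted
    | some r =>
      match h : PySem.List.remove? Arr r with
      | none => Sorted
      | some Arr' =>
        have : Arr'.length < Arr.length := by
          have hm : r ∈ Arr := by
            by_contra hn
            rw [(PySem.List.remove?_eq_none_iff Arr r).mpr hn] at h; cases h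
          rw [PySem.List.remove?_eq_some_erase Arr r hm] at h
          injection h with h
          rw [← h, Arr.length_erase_of_mem hm]
          exact Nat.sub_lt (List.length_pos_of_mem hm) one_pos
        Sort4Loop Arr' (Sorted ++ [r])
  else Sorted
termination_by Arr.length

def Sort4 (Arr : List Int) : List Int := Sort4Loop Arr []

-- the 'while (pos and neg)' interleave loop of Sort10, then the two extends
def InterA (pos neg ArrFinal : List Int) : List Int :=
  match pos, neg with
  | p :: ps, n :: ns => InterA ps ns (ArrFinal ++ [n, p])
  | pos, neg => ArrFinal ++ pos ++ neg

def Sort10 (Arr : List Int) : List Int :=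
  let Arr2 := Sort4 Arr
  let pos := Arr2.filter (fun i => i ≥ 0)
  let neg := Arr2.filter (fun i => i < 0)
  InterA pos neg []

-- ===== PORT B =====
-- while Arr: x = Arr.pop(); (pos if x >= 0 else neg).append(x)
def DrainB (arr pos neg : List Int) : List Int × List Int :=
  match harr : arr with
  | [] => (pos, neg)
  | _ :: _ =>
    have hne : arr ≠ [] := by rw [harr]; simp
    let x := arr.getLast hne
    have : arr.dropLast.length < arr.length := by
      rw [harr]; simp [List.length_dropLast]
    if x ≥ 0 then DrainB arr.dropLast (pos ++ [x]) neg
    else DrainB arr.dropLast pos (neg ++ [x])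
termination_by arr.length

def Sort10_alt (Arr : List Int) : List Int :=
  let pn := DrainB Arr [] []
  let pos := PySem.List.sorted pn.1 (fun x => x) false
  let neg := PySem.List.sorted pn.2 (fun x => x) false
  let out := (neg.zip pos).foldl (fun acc np => acc ++ [np.1, np.2]) []
  let k := min pos.length neg.length
  out ++ pos.drop k ++ neg.drop k

-- ===== PRECONDITION & SPEC =====
def Spec_Sort10 (Arr : List Int) (out : List Int) : Prop := out = Sort10_alt Arr
instance (Arr : List Int) (out : List Int) : Decidable (Spec_Sort10 Arr out) := by unfold Spec_Sort10; infer_instance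

-- ===== CLAIM (what is proved, stated in full; the proofs are below) =====
def Claim_equal_Sort10 : Prop := ∀ (Arr : List Int), Dom_Sort10 Arr → Spec_Sort10 Arr (Sort10 Arr)

-- ===== LEMMAS AND PROOFS =====

-- min(Arr[0:len(Arr)+1]) is min(Arr)
theorem minimun_full (Arr : List Int) :
    Minimun Arr 0 (Arr.length : Int) = PySem.List.min? Arr (fun x => x) := by
  unfold Minimun
  rw [PySem.List.slice_zero_start,
    show ((Arr.length : Int) + 1) = ((Arr.length + 1 : Nat) : Int) by push_cast; ring,
    PySem.List.slice_to_natCast, List.take_of_length_le (by omega)]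

-- pulling a minimum to the front IS sorting's head
theorem sorted_cons_min (a : List Int) (d : Int) (hd : d ∈ a)
    (hmin : ∀ y ∈ a, d ≤ y) :
    PySem.List.sorted a (fun x => x) false
      = d :: PySem.List.sorted (a.erase d) (fun x => x) false := by
  apply PySem.List.eq_of_perm_of_pairwise_le_of_injective (fun x : Int => x)
    (fun x y h => h)
  · exact (PySem.List.sorted_perm a _ false).trans
      ((List.perm_cons_erase hd).trans
        (List.Perm.cons d (PySem.List.sorted_perm (a.erase d) _ false).symm))
  · exact PySem.List.sorted_pairwise a _
  · refine List.Pairwise.cons (fun y hy => ?_) (PySem.List.sorted_pairwise _ _)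
    exact hmin y (List.mem_of_mem_erase ((PySem.List.mem_sorted _ _ _ _).mp hy))

-- selection sort: Sort4Loop accumulates exactly sorted(Arr)
theorem sort4Loop_eq (Arr Sorted : List Int) :
    Sort4Loop Arr Sorted = Sorted ++ PySem.List.sorted Arr (fun x => x) false := by
  induction Arr, Sorted using Sort4Loop.induct with
  | case1 a b c d =>
      rw [minimun_full, PySem.List.min?_eq_none_iff] at d
      simp [d] at c
  | case2 a b c d =>
      rename_i hmin hrem
      rw [minimun_full] at hmin
      have hd : d ∈ a := PySem.List.min?_mem hmin
      exact absurd hd ((PySem.List.remove?_eq_none_iff a d).mp hrem)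
  | case3 a b c d =>
      rename_i hr Arr' hrem hlt ih
      have hmin : (PySem.List.min? a fun x => x) = some d := by
        rw [← minimun_full]; exact hr
      have hd : d ∈ a := PySem.List.min?_mem hmin
      have hdmin : ∀ y ∈ a, d ≤ y := PySem.List.min?_isMin hmin
      have hA : Arr' = a.erase d := by
        have h2 := hrem
        rw [PySem.List.remove?_eq_some_erase a d hd] at h2
        injection h2 with h2; exact h2.symm
      rw [Sort4Loop]
      simp only [c, ne_eq, not_false_iff, if_pos, hr]
      split
      · rename_i hnone; rw [hrem] at hnone; cases hnone
      · rename_i A2 hsome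
        rw [hrem] at hsome; injection hsome with hsome; subst hsome
        rw [ih, hA, sorted_cons_min a d hd hdmin]
        simp
  | case4 a b =>
      rename_i h
      simp only [ne_eq, Decidable.not_not, List.length_eq_zero_iff] at h
      subst h
      rw [Sort4Loop]
      simp [PySem.List.sorted]

-- draining from the back partitions the reversed list into the two buckets
theorem drainB_eq (arr pos neg : List Int) :
    DrainB arr pos neg =
      (pos ++ arr.reverse.filter (fun i => i ≥ 0), neg ++ arr.reverse.filter (fun i => i < 0)) := by
  induction arr, pos, neg using DrainB.induct with
  | case1 pos neg => rw [DrainB]; simp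
  | case2 P N a as hne xlet hlt hcond =>
      rename_i ih
      have hl : (a :: as).dropLast ++ [(a :: as).getLast hne] = a :: as :=
        List.dropLast_append_getLast hne
      have hrev : (a :: as).reverse = (a :: as).getLast hne :: (a :: as).dropLast.reverse := by
        conv_lhs => rw [← hl]
        simp
      have hx : (0:Int) ≤ (a :: as).getLast hne := hcond
      rw [DrainB, if_pos hx, ih, hrev]
      simp [hx, show ¬((a :: as).getLast hne < 0) from by omega, List.append_assoc]
      rfl
  | case3 P N a as hne xlet hlt hcond =>
      rename_i ih
      have hl : (a :: as).dropLast ++ [(a :: as).getLast hne] = a :: as :=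
        List.dropLast_append_getLast hne
      have hrev : (a :: as).reverse = (a :: as).getLast hne :: (a :: as).dropLast.reverse := by
        conv_lhs => rw [← hl]
        simp
      have hx : ¬ (0:Int) ≤ (a :: as).getLast hne := hcond
      rw [DrainB, if_neg hx, ih, hrev]
      simp [hx, show ((a :: as).getLast hne < 0) from by omega, List.append_assoc]
      rfl

-- sorting commutes with filtering
theorem sorted_filter (l : List Int) (p : Int → Bool) :
    PySem.List.sorted (l.filter p) (fun x => x) false
      = (PySem.List.sorted l (fun x => x) false).filter p := by
  apply PySem.List.eq_of_perm_of_pairwise_le_of_injective (fun x : Int => x) (fun x y h => h)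
  · exact (PySem.List.sorted_perm _ _ false).trans
      (((PySem.List.sorted_perm l _ false).filter p).symm)
  · exact PySem.List.sorted_pairwise _ _
  · exact (PySem.List.sorted_pairwise l _).filter p

-- the interleave loop equals B's zip-flatMap plus the leftovers
theorem interA_eq (pos neg acc : List Int) :
    InterA pos neg acc =
      acc ++ (neg.zip pos).flatMap (fun np => [np.1, np.2])
        ++ pos.drop (min pos.length neg.length) ++ neg.drop (min pos.length neg.length) := by
  induction pos generalizing neg acc with
  | nil => cases neg <;> simp [InterA]
  | cons p ps ih =>
      cases neg with
      | nil => simp [InterA]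
      | cons n ns =>
          rw [InterA, ih]
          simp [Nat.succ_min_succ, List.append_assoc]

-- ===== VERDICT (by name: the statement is the Claim_ definition above) =====
theorem Sort10_spec : Claim_equal_Sort10 := by
  intro Arr _
  unfold Spec_Sort10 Sort10 Sort10_alt Sort4
  rw [sort4Loop_eq, drainB_eq]
  have hpos : PySem.List.sorted (Arr.reverse.filter (fun i => i ≥ 0)) (fun x => x) false
      = (PySem.List.sorted Arr (fun x => x) false).filter (fun i => i ≥ 0) := by
    rw [PySem.List.sorted_eq_sorted_of_perm _ (Arr.filter (fun i => i ≥ 0)) _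
      (fun x y h => h) ((Arr.reverse_perm).filter _), sorted_filter]
  have hneg : PySem.List.sorted (Arr.reverse.filter (fun i => i < 0)) (fun x => x) false
      = (PySem.List.sorted Arr (fun x => x) false).filter (fun i => i < 0) := by
    rw [PySem.List.sorted_eq_sorted_of_perm _ (Arr.filter (fun i => i < 0)) _
      (fun x y h => h) ((Arr.reverse_perm).filter _), sorted_filter]
  simp only [List.nil_append, hpos, hneg, PySem.List.foldl_append_eq_flatMap]
  rw [interA_eq]
  simp
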